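-- pv_equiv track=rewrite | github.com/OlgaSeleznova/ML_toolbox | Hebrew preprocessing class.py | count_stopwords
-- ===== SOURCE A (Python) =====
-- def count_stopwords(text:str, stopwords) -> int:
--     tokens = text.split(' ')
--     stopw = []
--     count = 0
--     for w in stopwords:
--         if w in tokens:
--             for i in range(len(tokens)):
--                 if (w == tokens[i]):
--                     count = count + 1
--             stopw.append(w)
--     return count
-- ===== SOURCE B (Python) =====
-- def count_stopwords(text: str, stopwords) -> int:
--     # Swap the loop nesting: tally the stopword list once, then make a
--     # single pass over the tokens, crediting each token its multiplicity
--     # in the stopword list.  Correct because both sides count the pairs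
--     # (w, t) with w in stopwords, t a token and w == t.
--     sw_counts = {}
--     for w in stopwords:
--         sw_counts[w] = sw_counts.get(w, 0) + 1
--     total = 0
--     for t in text.split(' '):
--         total += sw_counts.get(t, 0)
--     return total
-- ===== Notes on version B (the rewrite author's own statement) =====
-- stated objective: alternative
-- what changed: B inverts the iteration: it tallies the stopword list into a multiplicity table once and then makes a single pass over the tokens adding each token's multiplicity among the stopwords, instead of A's per-stopword membership test plus full index scan of the token list; correctness rests on the double-counting identity sum_w count_tokens(w) = sum_t count_stopwords(t).
import Mathlib
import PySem

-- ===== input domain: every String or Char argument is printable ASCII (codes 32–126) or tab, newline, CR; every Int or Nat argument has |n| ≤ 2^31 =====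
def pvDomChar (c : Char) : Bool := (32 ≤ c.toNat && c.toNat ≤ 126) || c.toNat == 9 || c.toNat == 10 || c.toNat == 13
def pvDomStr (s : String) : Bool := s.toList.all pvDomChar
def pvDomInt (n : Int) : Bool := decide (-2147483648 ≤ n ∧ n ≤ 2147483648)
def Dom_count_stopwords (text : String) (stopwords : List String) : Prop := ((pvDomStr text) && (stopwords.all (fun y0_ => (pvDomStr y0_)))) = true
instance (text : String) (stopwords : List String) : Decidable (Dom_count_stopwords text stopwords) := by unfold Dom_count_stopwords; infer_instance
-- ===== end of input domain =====

-- ===== PORT A =====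
-- B inverts the loop nesting: it tallies the stopword list once, then makes one pass
-- over the tokens adding each token's multiplicity among the stopwords (alternative).
def count_stopwords (text : String) (stopwords : List String) : Int :=
  let tokens := (PySem.Str.split? text " ").getD []
  (stopwords.foldl (fun (st : Int × List String) w =>
      if tokens.contains w then
        ((PySem.List.pyRange 0 (tokens.length : Int) 1).foldl
            (fun c i => if PySem.List.pyGetD tokens i "" == w then c + 1 else c) st.1,
         st.2 ++ [w])
      else st)
    (0, [])).1

-- ===== PORT B =====
def count_stopwords_alt (text : String) (stopwords : List String) : Int :=
  let sw_counts := stopwords.foldl (fun (d : PySem.Dict String Int) w => d.insert w (d.getD w 0 + 1)) PySem.Dict.empty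
  ((PySem.Str.split? text " ").getD []).foldl (fun total t => total + sw_counts.getD t 0) 0

-- ===== PRECONDITION & SPEC =====
def Spec_count_stopwords (text : String) (stopwords : List String) (out : Int) : Prop := out = count_stopwords_alt text stopwords
instance (text : String) (stopwords : List String) (out : Int) : Decidable (Spec_count_stopwords text stopwords out) := by unfold Spec_count_stopwords; infer_instance

-- ===== CLAIM (what is proved, stated in full; the proofs are below) =====
def Claim_equal_count_stopwords : Prop := ∀ (text : String) (stopwords : List String), Dom_count_stopwords text stopwords → Spec_count_stopwords text stopwords (count_stopwords text stopwords)

-- ===== LEMMAS AND PROOFS =====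

-- A's nested loop computes the sum over the stopword list of each stopword's count in the tokens.
theorem countA_foldl (tokens : List String) (sw : List String) (s : List String) (c : Int) :
    (sw.foldl (fun (st : Int × List String) w =>
      if tokens.contains w then
        ((PySem.List.pyRange 0 (tokens.length : Int) 1).foldl
            (fun c i => if PySem.List.pyGetD tokens i "" == w then c + 1 else c) st.1,
         st.2 ++ [w])
      else st) (c, s)).1
    = c + (sw.map (fun w => (tokens.count w : Int))).sum := by
  induction sw generalizing s c with
  | nil => simp
  | cons w ws ih =>
    simp only [List.foldl_cons, List.map_cons, List.sum_cons]
    by_cases h : tokens.contains w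
    · simp only [h, if_pos]
      rw [PySem.List.foldl_pyRange_zero_pyGetD' tokens ""
            (fun c x => if x == w then c + 1 else c) c,
          PySem.List.foldl_beq_add_one, ih]
      ring
    · simp only [h, if_neg, Bool.false_eq_true, not_false_iff]
      have hc : tokens.count w = 0 := by
        simp only [List.contains_eq_mem, decide_eq_true_eq] at h
        simp [List.count_eq_zero, h]
      rw [ih, hc]
      simp
  
-- a single-indicator sum is a count
theorem sum_indicator_eq_count (tokens : List String) (w : String) :
    (tokens.map (fun t => if t == w then (1 : Int) else 0)).sum = (tokens.count w : Int) := by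
  induction tokens with
  | nil => simp
  | cons t ts ih =>
    simp only [List.map_cons, List.sum_cons, List.count_cons, ih]
    by_cases h : t == w
    · simp [h]; omega
    · simp [h]

-- the double-counting identity: both sides count the matching pairs (w, t)
theorem sum_count_comm (sw tokens : List String) :
    (sw.map (fun w => (tokens.count w : Int))).sum
      = (tokens.map (fun t => (sw.count t : Int))).sum := by
  induction sw with
  | nil => simp
  | cons w ws ih =>
    simp only [List.map_cons, List.sum_cons, ih]
    have : (tokens.map (fun t => ((w :: ws).count t : Int)))
        = tokens.map (fun t => (ws.count t : Int) + if t == w then (1 : Int) else 0) := by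
      apply List.map_congr_left
      intro t _
      by_cases ht : t = w
      · subst ht; simp
      · simp [ht, Ne.symm ht]
    rw [this, List.sum_map_add, sum_indicator_eq_count]
    ring

-- ===== VERDICT (by name: the statement is the Claim_ definition above) =====
theorem count_stopwords_spec : Claim_equal_count_stopwords := by
  intro text stopwords _
  unfold Spec_count_stopwords count_stopwords count_stopwords_alt
  rw [countA_foldl, PySem.Dict.foldl_insert_getD_add_one_eq_counter]
  have hB : ((PySem.Str.split? text " ").getD []).foldl
      (fun total t => total + (PySem.Dict.counter stopwords).getD t 0) 0
      = (((PySem.Str.split? text " ").getD []).map (fun t => (stopwords.count t : Int))).sum := by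
    rw [PySem.List.foldl_add]
    simp only [PySem.Dict.getD_counter, zero_add]
  rw [hB, zero_add, sum_count_comm]
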